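-- pv_equiv track=rewrite | github.com/ZhiyuanChen/CHANfiG | chanfig/utils.py | find_circular_reference
-- ===== SOURCE A (Python) =====
-- from collections.abc import Callable, Mapping, Sequence
--
-- def find_circular_reference(graph: Mapping) -> list[str] | None:
--     def dfs(node, visited, path):  # pylint: disable=R1710
--         path.append(node)
--         if node in visited:
--             return path
--         visited.add(node)
--         for child in graph.get(node, []):
--             result = dfs(child, visited, path)
--             if result is not None:
--                 return result
--         visited.remove(node)
--
--     for key in graph:
--         result = dfs(key, set(), [])
--         if result is not None:
--             return result
--
--     return None
-- ===== SOURCE B (Python) =====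
-- def find_circular_reference(graph):
--     # Iterative DFS with an explicit task stack (visit/leave frames) instead of recursion.
--     for key in graph:
--         visited = set()
--         path = []
--         stack = [(False, key)]
--         while stack:
--             leave, node = stack.pop()
--             if leave:
--                 visited.remove(node)
--                 continue
--             path.append(node)
--             if node in visited:
--                 return path
--             visited.add(node)
--             stack.append((True, node))
--             for child in reversed(graph.get(node, [])):
--                 stack.append((False, child))
--     return None
-- ===== Notes on version B (the rewrite author's own statement) =====
-- stated objective: alternative
-- what changed: A's nested recursive dfs (with shared mutable visited/path) is replaced by an iterative DFS driven by an explicit stack of visit/leave task frames inside a single while loop.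
import Mathlib
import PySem

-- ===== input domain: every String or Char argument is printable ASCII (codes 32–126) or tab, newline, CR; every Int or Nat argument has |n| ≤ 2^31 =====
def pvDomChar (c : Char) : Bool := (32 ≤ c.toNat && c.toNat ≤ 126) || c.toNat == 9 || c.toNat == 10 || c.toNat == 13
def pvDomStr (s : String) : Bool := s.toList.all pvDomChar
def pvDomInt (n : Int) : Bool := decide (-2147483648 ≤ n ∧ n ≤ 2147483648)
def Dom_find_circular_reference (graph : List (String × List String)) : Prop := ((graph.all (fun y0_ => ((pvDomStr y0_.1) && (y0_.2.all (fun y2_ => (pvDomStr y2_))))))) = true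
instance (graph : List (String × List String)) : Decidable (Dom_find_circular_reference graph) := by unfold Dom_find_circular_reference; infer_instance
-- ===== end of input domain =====

-- B replaces A's recursive DFS with an explicit-stack iterative DFS (visit/leave task frames); same
-- return value, same cost (objective: alternative). The Lean ports carry a fuel counter only as a
-- termination guard; the fuel used is proved sufficient, so it never changes a result.

-- ===== PORT A =====
-- A's recursive `dfs(node, visited, path)`: state (visited, path) is threaded explicitly; the
-- `for child in graph.get(node, [])` loop is the mutual helper `dfsListA` (match on the lookup:
-- a missing key means an empty loop).  `visited.remove(node)` is ported as
-- `(PySem.Set.remove? v node).getD v`: at that point `node` is always in `visited` (it was added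
-- above and children restore the set), so the KeyError branch (`getD`'s default) is unreachable.
mutual
def dfsA (graph : List (String × List String)) : Nat → String → PySem.Set String → List String →
    Option (List String) × PySem.Set String × List String
  | 0, _, v, p => (none, v, p)  -- fuel guard, never reached with the fuel supplied below
  | fa + 1, node, v, p =>
    let p' := p ++ [node]
    if PySem.Set.contains v node then (some p', v, p')
    else
      match (PySem.Dict.mk graph).get? node with
      | none =>  -- graph.get(node, []) = []: the child loop runs zero times
        (none, (PySem.Set.remove? (PySem.Set.add v node) node).getD (PySem.Set.add v node), p')
      | some cs =>
        match dfsListA graph fa cs (PySem.Set.add v node) p' with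
        | (some r, v2, p2) => (some r, v2, p2)
        | (none, v2, p2) => (none, (PySem.Set.remove? v2 node).getD v2, p2)
termination_by fa _ _ _ => (fa, 0)

def dfsListA (graph : List (String × List String)) : Nat → List String → PySem.Set String → List String →
    Option (List String) × PySem.Set String × List String
  | _, [], v, p => (none, v, p)
  | fa, c :: cs, v, p =>
    match dfsA graph fa c v p with
    | (some r, v2, p2) => (some r, v2, p2)
    | (none, v2, p2) => dfsListA graph fa cs v2 p2
termination_by fa cs _ _ => (fa, cs.length + 1)
end

def loopA (graph : List (String × List String)) : List (String × List String) → Option (List String)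
  | [] => none
  | (k, _) :: rest =>
    match dfsA graph (graph.length + 2) k PySem.Set.empty [] with
    | (some r, _, _) => some r
    | (none, _, _) => loopA graph rest

def find_circular_reference (graph : List (String × List String)) : Option (List String) :=
  loopA graph graph

-- ===== PORT B =====
-- B's task stack: `(False, n)` = visit n, `(True, n)` = leave n; head of the list = top of stack.
inductive PvTask where
  | visit : String → PvTask
  | leave : String → PvTask
deriving DecidableEq, Repr

-- The `while stack:` loop.  Fuel (spent only on visit steps) is a termination guard; the bound
-- `pvBound` below is proved sufficient, so the `0, visit` branch is never reached.
def runB (graph : List (String × List String)) : Nat → List PvTask → PySem.Set String → List String →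
    Option (List String)
  | _, [], _, _ => none
  | f, .leave n :: rest, v, p => runB graph f rest ((PySem.Set.remove? v n).getD v) p
  | 0, .visit _ :: _, _, _ => none  -- fuel guard, never reached with the fuel supplied below
  | f + 1, .visit n :: rest, v, p =>
    let p' := p ++ [n]
    if PySem.Set.contains v n then some p'
    else
      runB graph f ((((PySem.Dict.mk graph).getD n []).map PvTask.visit) ++ PvTask.leave n :: rest)
        (PySem.Set.add v n) p'
termination_by f ts _ _ => (f, ts.length)

def pvDeg (graph : List (String × List String)) : Nat :=
  graph.foldl (fun a kv => max a kv.2.length) 0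

def pvBound (graph : List (String × List String)) : Nat :=
  (pvDeg graph + 1) ^ (graph.length + 1)

def loopB (graph : List (String × List String)) : List (String × List String) → Option (List String)
  | [] => none
  | (k, _) :: rest =>
    match runB graph (pvBound graph) [PvTask.visit k] PySem.Set.empty [] with
    | some r => some r
    | none => loopB graph rest

def find_circular_reference_alt (graph : List (String × List String)) : Option (List String) :=
  loopB graph graph

-- ===== PRECONDITION & SPEC =====
def Spec_find_circular_reference (graph : List (String × List String)) (out : Option (List String)) : Prop := out = find_circular_reference_alt graph
instance (graph : List (String × List String)) (out : Option (List String)) : Decidable (Spec_find_circular_reference graph out) := by unfold Spec_find_circular_reference; infer_instance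

-- ===== CLAIM (what is proved, stated in full; the proofs are below) =====
def Claim_equal_find_circular_reference : Prop := ∀ (graph : List (String × List String)), Dom_find_circular_reference graph → Spec_find_circular_reference graph (find_circular_reference graph)

-- ===== LEMMAS AND PROOFS =====

-- `KM graph v` = number of graph entries whose key is not yet in the visited set.
def KM (graph : List (String × List String)) (v : PySem.Set String) : Nat :=
  (graph.filter (fun kv => !(PySem.Set.contains v kv.1))).length

-- `E graph v` bounds the number of visit steps of a DFS started at any node with visited set v.
def E (graph : List (String × List String)) (v : PySem.Set String) : Nat :=
  (pvDeg graph + 1) ^ (KM graph v + 1)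

theorem filter_mono_le {α : Type} (l : List α) (p q : α → Bool)
    (himp : ∀ a, q a = true → p a = true) :
    (l.filter q).length ≤ (l.filter p).length := by
  induction l with
  | nil => simp
  | cons a l ih =>
    by_cases hqa : q a = true
    · simp [hqa, himp a hqa]; omega
    · by_cases hpa : p a = true <;> simp [hqa, hpa] <;> omega

theorem filter_strict {α : Type} (l : List α) (p q : α → Bool)
    (himp : ∀ a, q a = true → p a = true) (x : α) (hx : x ∈ l)
    (hp : p x = true) (hq : q x = false) :
    (l.filter q).length < (l.filter p).length := by
  induction l with
  | nil => cases hx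
  | cons a l ih =>
    rcases List.mem_cons.1 hx with rfl | hx'
    · have := filter_mono_le l p q himp
      simp [hp, hq]; omega
    · have h1 := ih hx'
      by_cases hqa : q a = true
      · simp [hqa, himp a hqa]; omega
      · by_cases hpa : p a = true <;> simp [hqa, hpa] <;> omega

theorem foldl_max_start_le (l : List (String × List String)) :
    ∀ a : Nat, a ≤ l.foldl (fun a kv => max a kv.2.length) a := by
  induction l with
  | nil => intro a; simp
  | cons kv l ih =>
    intro a
    have := ih (max a kv.2.length)
    simp only [List.foldl_cons]
    omega

theorem pvDeg_bound (graph : List (String × List String)) :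
    ∀ kv ∈ graph, kv.2.length ≤ pvDeg graph := by
  unfold pvDeg
  generalize (0 : Nat) = a
  induction graph generalizing a with
  | nil => intro kv h; cases h
  | cons hd l ih =>
    intro kv h
    rcases List.mem_cons.1 h with rfl | h'
    · have := foldl_max_start_le l (max a kv.2.length)
      simp only [List.foldl_cons]
      omega
    · exact ih _ kv h'

theorem get?_mk_mem {graph : List (String × List String)} {node : String} {cs : List String}
    (h : (PySem.Dict.mk graph).get? node = some cs) :
    ∃ kv ∈ graph, kv.1 = node ∧ kv.2 = cs := by
  unfold PySem.Dict.get? at h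
  simp only [Option.map_eq_some_iff] at h
  obtain ⟨kv, hfind, hcs⟩ := h
  have hmem := List.mem_of_find?_eq_some hfind
  have hkey := List.find?_some hfind
  exact ⟨kv, hmem, by simpa using hkey, hcs⟩

theorem remove_add_getD (v : PySem.Set String) (n : String) (h : n ∉ v) :
    (PySem.Set.remove? (PySem.Set.add v n) n).getD (PySem.Set.add v n) = v := by
  rw [PySem.Set.add_of_not_mem h]
  rw [PySem.Set.remove?_of_mem (by simp : n ∈ v ++ [n])]
  simp only [Option.getD_some]
  unfold PySem.Set.discard
  rw [List.filter_append]
  have h1 : v.filter (fun y => !y == n) = v := by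
    apply List.filter_eq_self.2
    intro a ha
    simp only [Bool.not_eq_eq_eq_not, Bool.not_true, beq_eq_false_iff_ne]
    exact fun hne => h (hne ▸ ha)
  simp [h1]

theorem contains_add_imp (v : PySem.Set String) (n x : String)
    (h : PySem.Set.contains v x = true) : PySem.Set.contains (PySem.Set.add v n) x = true := by
  rw [PySem.Set.contains_iff] at h ⊢
  unfold PySem.Set.add
  split <;> simp [h]

theorem KM_add_lt {graph : List (String × List String)} {v : PySem.Set String} {n : String}
    (hk : ∃ kv ∈ graph, kv.1 = n) (hn : n ∉ v) :
    KM graph (PySem.Set.add v n) < KM graph v := by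
  obtain ⟨kv, hmem, hfst⟩ := hk
  unfold KM
  have himp : ∀ a : String × List String,
      (!(PySem.Set.contains (PySem.Set.add v n) a.1)) = true → (!(PySem.Set.contains v a.1)) = true := by
    intro a ha
    simp only [Bool.not_eq_eq_eq_not, Bool.not_true] at ha ⊢
    cases hcv : PySem.Set.contains v a.1 with
    | false => rfl
    | true =>
      rw [contains_add_imp v n a.1 hcv] at ha
      exact absurd ha (by decide)
  have hp : (!(PySem.Set.contains v kv.1)) = true := by
    have : kv.1 ∉ v := by rw [hfst]; exact hn
    simp [PySem.Set.contains, this]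
  have hq : (!(PySem.Set.contains (PySem.Set.add v n) kv.1)) = false := by
    have : kv.1 ∈ PySem.Set.add v n := by rw [hfst, PySem.Set.mem_add]; right; rfl
    simp [PySem.Set.contains, this]
  exact filter_strict graph _ _ himp kv hmem hp hq

theorem KM_le (graph : List (String × List String)) (v : PySem.Set String) :
    KM graph v ≤ graph.length := List.length_filter_le _ _

theorem E_pos (graph : List (String × List String)) (v : PySem.Set String) : 1 ≤ E graph v :=
  Nat.one_le_pow _ _ (Nat.succ_pos _)

-- Arithmetic: one visit step plus the children's budgets fits in the parent's budget.
theorem E_step {graph : List (String × List String)} {v v' : PySem.Set String} {cs : List String}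
    (hcs : cs.length ≤ pvDeg graph) (hKM : KM graph v' + 1 ≤ KM graph v) :
    1 + cs.length * E graph v' ≤ E graph v := by
  have h1 : (pvDeg graph + 1) ^ (KM graph v' + 1) ≤ (pvDeg graph + 1) ^ (KM graph v) :=
    Nat.pow_le_pow_right (by omega) hKM
  have h2 : 1 ≤ (pvDeg graph + 1) ^ (KM graph v) := Nat.one_le_pow _ _ (by omega)
  have h3 := Nat.mul_le_mul hcs h1
  have h6 : (pvDeg graph + 1) ^ (KM graph v + 1)
      = pvDeg graph * (pvDeg graph + 1) ^ (KM graph v) + (pvDeg graph + 1) ^ (KM graph v) := by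
    rw [Nat.pow_succ]; ring
  unfold E
  rw [h6]
  omega

theorem triple_eq {α β γ : Type} {a a' : α} {b b' : β} {c c' : γ}
    (h : (a, (b, c)) = (a', (b', c'))) : a = a' ∧ b = b' ∧ c = c' := by
  injection h with h1 h2
  injection h2 with h2 h3
  exact ⟨h1, h2, h3⟩

theorem main_sim_list (graph : List (String × List String)) (fa : Nat)
    (IH : ∀ node v p r v2 p2, KM graph v + 1 ≤ fa → dfsA graph fa node v p = (r, v2, p2) →
      ((∀ s, r = some s → ∃ k, k ≤ E graph v ∧ ∀ rest f, k ≤ f →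
          runB graph f (PvTask.visit node :: rest) v p = some s)
       ∧ (r = none → v2 = v ∧ ∃ k, k ≤ E graph v ∧ ∀ rest f,
          runB graph (k + f) (PvTask.visit node :: rest) v p = runB graph f rest v p2))) :
    ∀ cs v p r v2 p2, KM graph v + 1 ≤ fa → dfsListA graph fa cs v p = (r, v2, p2) →
      ((∀ s, r = some s → ∃ k, k ≤ cs.length * E graph v ∧ ∀ rest f, k ≤ f →
          runB graph f (cs.map PvTask.visit ++ rest) v p = some s)
       ∧ (r = none → v2 = v ∧ ∃ k, k ≤ cs.length * E graph v ∧ ∀ rest f,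
          runB graph (k + f) (cs.map PvTask.visit ++ rest) v p = runB graph f rest v p2)) := by
  intro cs
  induction cs with
  | nil =>
    intro v p r v2 p2 hfa hd
    simp only [dfsListA] at hd
    obtain ⟨rfl, rfl, rfl⟩ := triple_eq hd
    constructor
    · intro s hs; cases hs
    · intro _
      refine ⟨rfl, 0, Nat.zero_le _, fun rest f => ?_⟩
      simp
  | cons c cs ihcs =>
    intro v p r v2 p2 hfa hd
    simp only [dfsListA] at hd
    rcases hdc : dfsA graph fa c v p with ⟨rc, vc, pc⟩
    rw [hdc] at hd
    have HC := IH c v p rc vc pc hfa hdc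
    cases rc with
    | some s =>
      obtain ⟨rfl, rfl, rfl⟩ := triple_eq hd
      constructor
      · intro s' hs'
        obtain rfl : s = s' := by injection hs'
        obtain ⟨k, hk, hrun⟩ := HC.1 s rfl
        refine ⟨k, ?_, fun rest f hf => ?_⟩
        · have h1 : E graph v ≤ (c :: cs).length * E graph v := by
            simp only [List.length_cons]
            have := Nat.le_mul_of_pos_left (E graph v) (Nat.succ_pos cs.length)
            omega
          omega
        · simpa using hrun (cs.map PvTask.visit ++ rest) f hf
      · intro h; cases h
    | none =>
      obtain ⟨hv, kc, hkc, hshift⟩ := HC.2 rfl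
      rw [hv] at hd
      have HT := ihcs v pc r v2 p2 hfa hd
      constructor
      · intro s hs
        obtain ⟨kt, hkt, hrun⟩ := HT.1 s hs
        refine ⟨kc + kt, ?_, fun rest f hf => ?_⟩
        · simp only [List.length_cons, Nat.succ_mul]; omega
        · have hf' : kt ≤ f - kc := by omega
          have heq : f = kc + (f - kc) := by omega
          rw [heq]
          calc runB graph (kc + (f - kc)) ((c :: cs).map PvTask.visit ++ rest) v p
              = runB graph (f - kc) (cs.map PvTask.visit ++ rest) v pc := by
                simpa using hshift (cs.map PvTask.visit ++ rest) (f - kc)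
            _ = some s := hrun rest (f - kc) hf'
      · intro hr
        obtain ⟨hv2, kt, hkt, hrun⟩ := HT.2 hr
        refine ⟨hv2, kc + kt, ?_, fun rest f => ?_⟩
        · simp only [List.length_cons, Nat.succ_mul]; omega
        · calc runB graph (kc + kt + f) ((c :: cs).map PvTask.visit ++ rest) v p
              = runB graph (kt + f) (cs.map PvTask.visit ++ rest) v pc := by
                have := hshift (cs.map PvTask.visit ++ rest) (kt + f)
                simpa [Nat.add_assoc] using this
            _ = runB graph f rest v p2 := hrun rest f

theorem main_sim (graph : List (String × List String)) :
    ∀ fa node v p r v2 p2, KM graph v + 1 ≤ fa → dfsA graph fa node v p = (r, v2, p2) →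
      ((∀ s, r = some s → ∃ k, k ≤ E graph v ∧ ∀ rest f, k ≤ f →
          runB graph f (PvTask.visit node :: rest) v p = some s)
       ∧ (r = none → v2 = v ∧ ∃ k, k ≤ E graph v ∧ ∀ rest f,
          runB graph (k + f) (PvTask.visit node :: rest) v p = runB graph f rest v p2)) := by
  intro fa
  induction fa with
  | zero => intro node v p r v2 p2 hfa; omega
  | succ fa ih =>
    intro node v p r v2 p2 hfa hd
    simp only [dfsA] at hd
    by_cases hc : PySem.Set.contains v node = true
    · rw [if_pos hc] at hd
      obtain ⟨rfl, rfl, rfl⟩ := triple_eq hd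
      constructor
      · intro s hs
        obtain rfl : p ++ [node] = s := by injection hs
        refine ⟨1, E_pos graph v, fun rest f hf => ?_⟩
        obtain ⟨f', rfl⟩ : ∃ f', f = f' + 1 := ⟨f - 1, by omega⟩
        simp only [runB, hc, if_pos]
      · intro h; cases h
    · rw [if_neg hc] at hd
      have hnv : node ∉ v := by
        intro hm
        exact hc ((PySem.Set.contains_iff v node).2 hm)
      have hstep : ∀ f rest, runB graph (f + 1) (PvTask.visit node :: rest) v p =
          runB graph f ((((PySem.Dict.mk graph).getD node []).map PvTask.visit)
              ++ PvTask.leave node :: rest) (PySem.Set.add v node) (p ++ [node]) := by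
        intro f rest
        simp only [runB, hc, if_neg, Bool.false_eq_true, not_false_iff]
      cases hG : (PySem.Dict.mk graph).get? node with
      | none =>
        rw [hG] at hd
        obtain ⟨rfl, rfl, rfl⟩ := triple_eq hd
        constructor
        · intro s hs; cases hs
        · intro _
          refine ⟨remove_add_getD v node hnv, 1, E_pos graph v, fun rest f => ?_⟩
          have h1 : 1 + f = f + 1 := by omega
          rw [h1, hstep]
          rw [PySem.Dict.getD_eq_get?_getD, hG]
          simp only [Option.getD_none, List.map_nil, List.nil_append]
          simp only [runB]
          rw [remove_add_getD v node hnv]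
      | some cs =>
        rw [hG] at hd
        dsimp only at hd
        have hkey : ∃ kv ∈ graph, kv.1 = node := by
          obtain ⟨kv, hm, h1, _⟩ := get?_mk_mem hG
          exact ⟨kv, hm, h1⟩
        have hKM : KM graph (PySem.Set.add v node) < KM graph v := KM_add_lt hkey hnv
        have hfa' : KM graph (PySem.Set.add v node) + 1 ≤ fa := by omega
        have hcs : cs.length ≤ pvDeg graph := by
          obtain ⟨kv, hm, _, h2⟩ := get?_mk_mem hG
          have := pvDeg_bound graph kv hm
          rw [h2] at this; exact this
        have hE : 1 + cs.length * E graph (PySem.Set.add v node) ≤ E graph v :=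
          E_step hcs (by omega)
        rcases hdl : dfsListA graph fa cs (PySem.Set.add v node) (p ++ [node]) with ⟨rl, vl, pl⟩
        rw [hdl] at hd
        have HL := main_sim_list graph fa ih cs (PySem.Set.add v node) (p ++ [node]) rl vl pl hfa' hdl
        have hstep' : ∀ f rest, runB graph (f + 1) (PvTask.visit node :: rest) v p =
            runB graph f (cs.map PvTask.visit ++ PvTask.leave node :: rest)
              (PySem.Set.add v node) (p ++ [node]) := by
          intro f rest
          rw [hstep]
          rw [PySem.Dict.getD_eq_get?_getD, hG]
          simp only [Option.getD_some]
        cases rl with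
        | some s =>
          dsimp only at hd
          obtain ⟨rfl, rfl, rfl⟩ := triple_eq hd
          constructor
          · intro s' hs'
            obtain rfl : s = s' := by injection hs'
            obtain ⟨kL, hkL, hrun⟩ := HL.1 s rfl
            refine ⟨kL + 1, by omega, fun rest f hf => ?_⟩
            obtain ⟨f', rfl⟩ : ∃ f', f = f' + 1 := ⟨f - 1, by omega⟩
            rw [hstep']
            exact hrun (PvTask.leave node :: rest) f' (by omega)
          · intro h; cases h
        | none =>
          obtain ⟨hvl, kL, hkL, hshift⟩ := HL.2 rfl
          rw [hvl] at hd
          obtain ⟨rfl, rfl, rfl⟩ := triple_eq hd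
          constructor
          · intro s hs; cases hs
          · intro _
            refine ⟨remove_add_getD v node hnv, kL + 1, by omega, fun rest f => ?_⟩
            have h1 : kL + 1 + f = (kL + f) + 1 := by omega
            rw [h1, hstep']
            calc runB graph (kL + f) (cs.map PvTask.visit ++ PvTask.leave node :: rest)
                  (PySem.Set.add v node) (p ++ [node])
                = runB graph f (PvTask.leave node :: rest) (PySem.Set.add v node) pl :=
                  hshift (PvTask.leave node :: rest) f
              _ = runB graph f rest
                    ((PySem.Set.remove? (PySem.Set.add v node) node).getD (PySem.Set.add v node)) pl := by
                  simp only [runB]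
              _ = _ := by rw [remove_add_getD v node hnv]

theorem pvBound_ge (graph : List (String × List String)) :
    E graph PySem.Set.empty ≤ pvBound graph := by
  unfold E pvBound
  exact Nat.pow_le_pow_right (Nat.succ_le_succ (Nat.zero_le _))
    (Nat.succ_le_succ (KM_le graph _))

theorem loop_eq (graph : List (String × List String)) :
    ∀ l, loopA graph l = loopB graph l := by
  intro l
  induction l with
  | nil => simp [loopA, loopB]
  | cons kv rest ih =>
    rcases kv with ⟨k, cs0⟩
    rcases hdk : dfsA graph (graph.length + 2) k PySem.Set.empty [] with ⟨r, v2, p2⟩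
    have hfa : KM graph PySem.Set.empty + 1 ≤ graph.length + 2 := by
      have := KM_le graph PySem.Set.empty; omega
    have H := main_sim graph (graph.length + 2) k PySem.Set.empty [] r v2 p2 hfa hdk
    cases r with
    | some s =>
      obtain ⟨kB, hkB, hrun⟩ := H.1 s rfl
      have hB : runB graph (pvBound graph) [PvTask.visit k] PySem.Set.empty [] = some s := by
        have := hrun [] (pvBound graph) (by have := pvBound_ge graph; omega)
        simpa using this
      simp only [loopA, loopB, hdk, hB]
    | none =>
      obtain ⟨_, kB, hkB, hshift⟩ := H.2 rfl
      have hB : runB graph (pvBound graph) [PvTask.visit k] PySem.Set.empty [] = none := by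
        have hle : kB ≤ pvBound graph := le_trans hkB (pvBound_ge graph)
        have heq : pvBound graph = kB + (pvBound graph - kB) := by omega
        rw [heq]
        have := hshift [] (pvBound graph - kB)
        simpa [runB] using this
      simp only [loopA, loopB, hdk, hB]
      exact ih

-- ===== VERDICT (by name: the statement is the Claim_ definition above) =====
theorem find_circular_reference_spec : Claim_equal_find_circular_reference := by
  intro graph _
  show find_circular_reference graph = find_circular_reference_alt graph
  exact loop_eq graph graph
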